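-- pv_equiv track=rewrite | github.com/RobPinna/Operational-Leverage-Framework | app/utils/demo_seed.py | _build_generic_rows
-- ===== SOURCE A (Python) =====
-- def _row(
--     category: str,
--     title: str,
--     snippet: str,
--     source_url: str,
--     base_confidence: int,
--     tag: str,
-- ) -> tuple[str, str, str, str, int, str]:
--     return category, title, snippet, source_url, base_confidence, tag
--
-- def _build_generic_rows(company_name: str, domain: str) -> list[tuple[str, str, str, str, int, str]]:
--     rows: list[tuple[str, str, str, str, int, str]] = []
--     for idx in range(12):
--         rows.append(
--             _row(
--                 "exposure",
--                 f"{company_name} generic exposure signal {idx + 1}",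
--                 "Public-facing information reveals process and contact metadata relevant to reconnaissance.",
--                 f"https://{domain}/demo/exposure/{idx + 1}",
--                 72,
--                 "generic_exposure",
--             )
--         )
--     for idx in range(10):
--         rows.append(
--             _row(
--                 "mention",
--                 f"{company_name} generic narrative signal {idx + 1}",
--                 "External discussion references trust, communications and verification concerns.",
--                 f"https://signal-feed.example/{domain}/mention/{idx + 1}",
--                 60,
--                 "generic_mention",
--             )
--         )
--     for idx in range(8):
--         rows.append(
--             _row(
--                 "touchpoint",
--                 f"{company_name} generic external contact channel signal {idx + 1}",
--                 "Operational channel may be vulnerable to impersonation-driven confusion.",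
--                 f"mock://touchpoint/generic/{idx + 1}",
--                 74,
--                 "generic_touchpoint",
--             )
--         )
--     for idx in range(6):
--         rows.append(
--             _row(
--                 "pivot",
--                 f"{company_name} generic risk to clients via impersonation signal {idx + 1}",
--                 "Sanitized scenario indicating potential misuse of organizational identity toward clients or partners.",
--                 f"mock://pivot/generic/{idx + 1}",
--                 79,
--                 "generic_pivot",
--             )
--         )
--     return rows
-- ===== SOURCE B (Python) =====
-- def _build_generic_rows(company_name: str, domain: str) -> list[tuple[str, str, str, str, int, str]]:
--     # Recursive, back-to-front construction: categories are processed in REVERSE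
--     # order (pivot, touchpoint, mention, exposure) and each category's rows are
--     # prepended with a descending counter, so the list is built by cons only,
--     # with no append and no forward loop.
--     def emit(n, make, acc):
--         if n == 0:
--             return acc
--         return emit(n - 1, make, [make(n)] + acc)
--
--     def exposure(n):
--         return ("exposure",
--                 f"{company_name} generic exposure signal {n}",
--                 "Public-facing information reveals process and contact metadata relevant to reconnaissance.",
--                 f"https://{domain}/demo/exposure/{n}",
--                 72, "generic_exposure")
--
--     def mention(n):
--         return ("mention",
--                 f"{company_name} generic narrative signal {n}",
--                 "External discussion references trust, communications and verification concerns.",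
--                 f"https://signal-feed.example/{domain}/mention/{n}",
--                 60, "generic_mention")
--
--     def touchpoint(n):
--         return ("touchpoint",
--                 f"{company_name} generic external contact channel signal {n}",
--                 "Operational channel may be vulnerable to impersonation-driven confusion.",
--                 f"mock://touchpoint/generic/{n}",
--                 74, "generic_touchpoint")
--
--     def pivot(n):
--         return ("pivot",
--                 f"{company_name} generic risk to clients via impersonation signal {n}",
--                 "Sanitized scenario indicating potential misuse of organizational identity toward clients or partners.",
--                 f"mock://pivot/generic/{n}",
--                 79, "generic_pivot")
--
--     acc = []
--     acc = emit(6, pivot, acc)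
--     acc = emit(8, touchpoint, acc)
--     acc = emit(10, mention, acc)
--     acc = emit(12, exposure, acc)
--     return acc
-- ===== Notes on version B (the rewrite author's own statement) =====
-- stated objective: alternative
-- what changed: Builds the list back-to-front by pure cons: a recursive emitter prepends each category's rows with a descending counter, processing the categories in reverse (pivot, touchpoint, mention, exposure), instead of A's four forward loops that append to a growing list.
import Mathlib
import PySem

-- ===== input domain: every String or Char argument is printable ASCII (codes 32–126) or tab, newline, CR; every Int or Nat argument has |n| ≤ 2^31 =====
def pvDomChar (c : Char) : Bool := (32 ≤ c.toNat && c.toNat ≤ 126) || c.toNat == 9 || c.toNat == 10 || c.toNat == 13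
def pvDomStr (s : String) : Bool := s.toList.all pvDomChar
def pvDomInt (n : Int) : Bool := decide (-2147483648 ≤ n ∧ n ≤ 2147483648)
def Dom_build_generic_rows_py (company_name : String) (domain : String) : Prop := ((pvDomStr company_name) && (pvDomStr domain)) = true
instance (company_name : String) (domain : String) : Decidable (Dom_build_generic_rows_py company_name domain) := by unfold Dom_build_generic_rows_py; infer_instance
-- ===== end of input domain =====

-- B builds the same 36 rows back-to-front: a recursive emitter prepends rows by cons with a
-- descending counter, processing the categories in reverse order, instead of A's four
-- forward append loops (alternative decomposition; same cost).
-- ===== PORT A =====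
def build_generic_rows_py (company_name : String) (domain : String) : List (String × String × String × String × Int × String) :=
  let rows : List (String × String × String × String × Int × String) := []
  let rows := (PySem.List.pyRange 0 12 1).foldl (fun rows idx =>
    rows ++ [("exposure",
      company_name ++ " generic exposure signal " ++ PySem.Int.toStr (idx + 1),
      "Public-facing information reveals process and contact metadata relevant to reconnaissance.",
      "https://" ++ domain ++ "/demo/exposure/" ++ PySem.Int.toStr (idx + 1),
      (72 : Int), "generic_exposure")]) rows
  let rows := (PySem.List.pyRange 0 10 1).foldl (fun rows idx =>
    rows ++ [("mention",
      company_name ++ " generic narrative signal " ++ PySem.Int.toStr (idx + 1),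
      "External discussion references trust, communications and verification concerns.",
      "https://signal-feed.example/" ++ domain ++ "/mention/" ++ PySem.Int.toStr (idx + 1),
      (60 : Int), "generic_mention")]) rows
  let rows := (PySem.List.pyRange 0 8 1).foldl (fun rows idx =>
    rows ++ [("touchpoint",
      company_name ++ " generic external contact channel signal " ++ PySem.Int.toStr (idx + 1),
      "Operational channel may be vulnerable to impersonation-driven confusion.",
      "mock://touchpoint/generic/" ++ PySem.Int.toStr (idx + 1),
      (74 : Int), "generic_touchpoint")]) rows
  let rows := (PySem.List.pyRange 0 6 1).foldl (fun rows idx =>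
    rows ++ [("pivot",
      company_name ++ " generic risk to clients via impersonation signal " ++ PySem.Int.toStr (idx + 1),
      "Sanitized scenario indicating potential misuse of organizational identity toward clients or partners.",
      "mock://pivot/generic/" ++ PySem.Int.toStr (idx + 1),
      (79 : Int), "generic_pivot")]) rows
  rows

-- ===== PORT B =====
-- B's recursive emitter: prepend make(n), make(n-1), …, make(1) onto acc (descending counter, cons only).
def pvEmitRows (make : Int → String × String × String × String × Int × String) :
    Nat → List (String × String × String × String × Int × String) →
    List (String × String × String × String × Int × String)
  | 0, acc => acc
  | Nat.succ n, acc => pvEmitRows make n (make (Int.ofNat (n + 1)) :: acc)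

def build_generic_rows_py_alt (company_name : String) (domain : String) : List (String × String × String × String × Int × String) :=
  let exposure := fun (n : Int) =>
    ("exposure",
      company_name ++ " generic exposure signal " ++ PySem.Int.toStr n,
      "Public-facing information reveals process and contact metadata relevant to reconnaissance.",
      "https://" ++ domain ++ "/demo/exposure/" ++ PySem.Int.toStr n,
      (72 : Int), "generic_exposure")
  let mention := fun (n : Int) =>
    ("mention",
      company_name ++ " generic narrative signal " ++ PySem.Int.toStr n,
      "External discussion references trust, communications and verification concerns.",
      "https://signal-feed.example/" ++ domain ++ "/mention/" ++ PySem.Int.toStr n,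
      (60 : Int), "generic_mention")
  let touchpoint := fun (n : Int) =>
    ("touchpoint",
      company_name ++ " generic external contact channel signal " ++ PySem.Int.toStr n,
      "Operational channel may be vulnerable to impersonation-driven confusion.",
      "mock://touchpoint/generic/" ++ PySem.Int.toStr n,
      (74 : Int), "generic_touchpoint")
  let pivot := fun (n : Int) =>
    ("pivot",
      company_name ++ " generic risk to clients via impersonation signal " ++ PySem.Int.toStr n,
      "Sanitized scenario indicating potential misuse of organizational identity toward clients or partners.",
      "mock://pivot/generic/" ++ PySem.Int.toStr n,
      (79 : Int), "generic_pivot")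
  let acc : List (String × String × String × String × Int × String) := []
  let acc := pvEmitRows pivot 6 acc
  let acc := pvEmitRows touchpoint 8 acc
  let acc := pvEmitRows mention 10 acc
  let acc := pvEmitRows exposure 12 acc
  acc

-- ===== PRECONDITION & SPEC =====
def Spec_build_generic_rows_py (company_name : String) (domain : String) (out : List (String × String × String × String × Int × String)) : Prop := out = build_generic_rows_py_alt company_name domain
instance (company_name : String) (domain : String) (out : List (String × String × String × String × Int × String)) : Decidable (Spec_build_generic_rows_py company_name domain out) := by unfold Spec_build_generic_rows_py; infer_instance

-- ===== CLAIM =====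
def Claim_equal_build_generic_rows_py : Prop := ∀ (company_name : String) (domain : String), Dom_build_generic_rows_py company_name domain → Spec_build_generic_rows_py company_name domain (build_generic_rows_py company_name domain)

-- ===== LEMMAS AND PROOFS =====

-- ===== VERDICT =====
theorem build_generic_rows_py_spec : Claim_equal_build_generic_rows_py := by
  intro company_name domain _
  unfold Spec_build_generic_rows_py build_generic_rows_py build_generic_rows_py_alt
  simp [PySem.List.pyRange, pvEmitRows, String.append_assoc, List.range_succ]
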